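-- pv_equiv track=rewrite | github.com/john-bush/safety-gymnasium | rl_tests/discrete_tests/custom_env.py | process_obstacles
-- ===== SOURCE A (Python) =====
-- def process_obstacles(agent_location, obstacles, threshold=15):
--     """
--     Simplify obstacle information.
--
--     Args:
--     - agent_location: Tuple (x, y) for the location of the agent.
--     - obstacles: List of tuples [(x1, y1), (x2, y2), ...] representing obstacle locations.
--     - threshold: Distance within which an obstacle is considered 'close'.
--
--     Returns:
--     - Tuple of four binary values indicating the presence of an obstacle in the North, South, East, and West directions.
--     """
--     north_obstacle = south_obstacle = east_obstacle = west_obstacle = 0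
--
--     for obstacle in obstacles:
--         # Calculate the difference in position
--         dx, dy = obstacle[0] - agent_location[0], obstacle[1] - agent_location[1]
--
--         # Check North (negative y-direction)
--         if dy < 0 and abs(dy) <= threshold and abs(dx) <= threshold:
--             north_obstacle = 1
--
--         # Check South (positive y-direction)
--         if dy > 0 and abs(dy) <= threshold and abs(dx) <= threshold:
--             south_obstacle = 1
--
--         # Check East (positive x-direction)
--         if dx > 0 and abs(dx) <= threshold and abs(dy) <= threshold:
--             east_obstacle = 1
--
--         # Check West (negative x-direction)
--         if dx < 0 and abs(dx) <= threshold and abs(dy) <= threshold: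
--             west_obstacle = 1
--
--     return north_obstacle, south_obstacle, east_obstacle, west_obstacle
-- ===== SOURCE B (Python) =====
-- def process_obstacles(agent_location, obstacles, threshold=15):
--     ax, ay = agent_location
--     north = int(any((o[1] - ay) < 0 and abs(o[1] - ay) <= threshold and abs(o[0] - ax) <= threshold for o in obstacles))
--     south = int(any((o[1] - ay) > 0 and abs(o[1] - ay) <= threshold and abs(o[0] - ax) <= threshold for o in obstacles))
--     east  = int(any((o[0] - ax) > 0 and abs(o[0] - ax) <= threshold and abs(o[1] - ay) <= threshold for o in obstacles))
--     west  = int(any((o[0] - ax) < 0 and abs(o[0] - ax) <= threshold and abs(o[1] - ay) <= threshold for o in obstacles))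
--     return north, south, east, west
-- ===== Notes on version B (the rewrite author's own statement) =====
-- stated objective: idiomatic
-- what changed: Replaces the single accumulating loop over obstacles with four independent short-circuiting any() scans, one per direction, each converted to int.
import Mathlib
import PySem

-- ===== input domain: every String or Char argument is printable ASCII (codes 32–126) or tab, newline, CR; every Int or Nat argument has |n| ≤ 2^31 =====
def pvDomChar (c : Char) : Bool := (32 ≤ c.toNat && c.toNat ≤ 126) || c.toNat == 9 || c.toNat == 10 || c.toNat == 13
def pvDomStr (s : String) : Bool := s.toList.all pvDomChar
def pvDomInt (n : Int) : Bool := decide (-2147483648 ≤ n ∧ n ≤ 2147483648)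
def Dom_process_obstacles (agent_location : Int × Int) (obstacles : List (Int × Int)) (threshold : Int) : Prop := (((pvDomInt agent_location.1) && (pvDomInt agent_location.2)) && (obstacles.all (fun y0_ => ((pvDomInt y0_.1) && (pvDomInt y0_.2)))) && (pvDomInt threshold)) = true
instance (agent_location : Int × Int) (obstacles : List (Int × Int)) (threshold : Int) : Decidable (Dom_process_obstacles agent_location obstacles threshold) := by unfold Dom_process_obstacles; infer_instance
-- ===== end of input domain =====

-- B: four independent any() scans per direction instead of one accumulating loop (idiomatic decomposition; same cost).


-- ===== PORT A =====
def process_obstacles (agent_location : Int × Int) (obstacles : List (Int × Int)) (threshold : Int) : Int × Int × Int × Int :=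
  obstacles.foldl (fun s obstacle =>
    let dx := obstacle.1 - agent_location.1
    let dy := obstacle.2 - agent_location.2
    let n := if dy < 0 ∧ |dy| ≤ threshold ∧ |dx| ≤ threshold then 1 else s.1
    let so := if dy > 0 ∧ |dy| ≤ threshold ∧ |dx| ≤ threshold then 1 else s.2.1
    let e := if dx > 0 ∧ |dx| ≤ threshold ∧ |dy| ≤ threshold then 1 else s.2.2.1
    let w := if dx < 0 ∧ |dx| ≤ threshold ∧ |dy| ≤ threshold then 1 else s.2.2.2
    (n, so, e, w)) (0, 0, 0, 0)

-- ===== PORT B =====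
-- int(bool) in Python
def pvB2I (b : Bool) : Int := if b then 1 else 0

def process_obstacles_alt (agent_location : Int × Int) (obstacles : List (Int × Int)) (threshold : Int) : Int × Int × Int × Int :=
  let ax := agent_location.1
  let ay := agent_location.2
  let north := pvB2I (obstacles.any fun o => decide (o.2 - ay < 0 ∧ |o.2 - ay| ≤ threshold ∧ |o.1 - ax| ≤ threshold))
  let south := pvB2I (obstacles.any fun o => decide (o.2 - ay > 0 ∧ |o.2 - ay| ≤ threshold ∧ |o.1 - ax| ≤ threshold))
  let east  := pvB2I (obstacles.any fun o => decide (o.1 - ax > 0 ∧ |o.1 - ax| ≤ threshold ∧ |o.2 - ay| ≤ threshold))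
  let west  := pvB2I (obstacles.any fun o => decide (o.1 - ax < 0 ∧ |o.1 - ax| ≤ threshold ∧ |o.2 - ay| ≤ threshold))
  (north, south, east, west)

-- ===== PRECONDITION & SPEC =====
def Spec_process_obstacles (agent_location : Int × Int) (obstacles : List (Int × Int)) (threshold : Int) (out : Int × Int × Int × Int) : Prop := out = process_obstacles_alt agent_location obstacles threshold
instance (agent_location : Int × Int) (obstacles : List (Int × Int)) (threshold : Int) (out : Int × Int × Int × Int) : Decidable (Spec_process_obstacles agent_location obstacles threshold out) := by unfold Spec_process_obstacles; infer_instance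

-- ===== CLAIM (what is proved, stated in full; the proofs are below) =====
def Claim_equal_process_obstacles : Prop := ∀ (agent_location : Int × Int) (obstacles : List (Int × Int)) (threshold : Int), Dom_process_obstacles agent_location obstacles threshold → Spec_process_obstacles agent_location obstacles threshold (process_obstacles agent_location obstacles threshold)

-- ===== LEMMAS AND PROOFS =====
-- The fold from an arbitrary accumulator: each component is 1 if some obstacle triggers it, else the starting value.
theorem process_obstacles_fold_char (agent_location : Int × Int) (obstacles : List (Int × Int)) (threshold : Int) (s : Int × Int × Int × Int) :
    obstacles.foldl (fun s obstacle =>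
      let dx := obstacle.1 - agent_location.1
      let dy := obstacle.2 - agent_location.2
      let n := if dy < 0 ∧ |dy| ≤ threshold ∧ |dx| ≤ threshold then 1 else s.1
      let so := if dy > 0 ∧ |dy| ≤ threshold ∧ |dx| ≤ threshold then 1 else s.2.1
      let e := if dx > 0 ∧ |dx| ≤ threshold ∧ |dy| ≤ threshold then 1 else s.2.2.1
      let w := if dx < 0 ∧ |dx| ≤ threshold ∧ |dy| ≤ threshold then 1 else s.2.2.2
      (n, so, e, w)) s
    = (if obstacles.any (fun o => decide (o.2 - agent_location.2 < 0 ∧ |o.2 - agent_location.2| ≤ threshold ∧ |o.1 - agent_location.1| ≤ threshold)) then 1 else s.1,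
       if obstacles.any (fun o => decide (o.2 - agent_location.2 > 0 ∧ |o.2 - agent_location.2| ≤ threshold ∧ |o.1 - agent_location.1| ≤ threshold)) then 1 else s.2.1,
       if obstacles.any (fun o => decide (o.1 - agent_location.1 > 0 ∧ |o.1 - agent_location.1| ≤ threshold ∧ |o.2 - agent_location.2| ≤ threshold)) then 1 else s.2.2.1,
       if obstacles.any (fun o => decide (o.1 - agent_location.1 < 0 ∧ |o.1 - agent_location.1| ≤ threshold ∧ |o.2 - agent_location.2| ≤ threshold)) then 1 else s.2.2.2) := by
  induction obstacles generalizing s with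
  | nil => simp
  | cons o rest ih =>
    simp only [List.foldl_cons, List.any_cons, ih]
    obtain ⟨s1, s2, s3, s4⟩ := s
    simp only [Bool.or_eq_true, decide_eq_true_eq, Prod.mk.injEq]
    refine ⟨?_, ?_, ?_, ?_⟩ <;> (split_ifs <;> first | rfl | tauto)


-- ===== VERDICT (by name: the statement is the Claim_ definition above) =====
theorem process_obstacles_spec : Claim_equal_process_obstacles := by
  intro al obs t _
  unfold Spec_process_obstacles process_obstacles process_obstacles_alt pvB2I
  rw [process_obstacles_fold_char]
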